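-- pv_equiv track=rewrite | github.com/sangka9/codingPractice | programmers/twoBits.py | solution
-- ===== SOURCE A (Python) =====
-- def solution(numbers):
--     answer = []
--
--     for i in range(len(numbers)) :
--         if(numbers[i] % 4 != 3) :
--             answer.append(numbers[i] + 1)
--         else :
--             tmp = bin(numbers[i])
--             tmp = "0" + tmp[2:]
--
--             for i in range(len(tmp)-1,-1,-1) :
--                 if(tmp[i] == "0") :
--                     tmp = tmp [0:i] + "10" + tmp[i+2:]
--                     break
--             answer.append(int(tmp,2))
--
--     return answer
-- ===== SOURCE B (Python) =====
-- def solution(numbers):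
--     # closed-form bit arithmetic: for n % 4 == 3, add half of the lowest set
--     # bit of n+1 (= lowest unset bit of n); otherwise just n + 1.
--     return [n + 1 if n % 4 != 3 else n + ((n + 1) & -(n + 1)) // 2
--             for n in numbers]
-- ===== Notes on version B (the rewrite author's own statement) =====
-- stated objective: simpler
-- what changed: A converts each qualifying number to a binary string, scans the string from the right for the first '0', splices in "10" and re-parses the string as an integer; B replaces all of that with the closed-form bit expression n + ((n + 1) & -(n + 1)) // 2 inside a single comprehension, so no strings and no inner scan exist at all.
-- outside the precondition, e.g. on solution([-1]): A returns [5], B returns [-1]; on solution([-5]): A returns [6], B returns [-3]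
import Mathlib
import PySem

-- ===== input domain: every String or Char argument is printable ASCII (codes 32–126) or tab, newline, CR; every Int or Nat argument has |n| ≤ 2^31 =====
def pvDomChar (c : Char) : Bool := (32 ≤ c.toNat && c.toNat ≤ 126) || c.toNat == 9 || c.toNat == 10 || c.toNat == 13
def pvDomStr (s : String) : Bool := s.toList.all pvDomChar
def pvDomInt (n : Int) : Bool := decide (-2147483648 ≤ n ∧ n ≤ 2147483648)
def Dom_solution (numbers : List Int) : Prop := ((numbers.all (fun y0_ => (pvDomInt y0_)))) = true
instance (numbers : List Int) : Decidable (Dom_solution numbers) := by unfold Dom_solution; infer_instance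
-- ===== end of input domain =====

-- B replaces A's binary-string surgery by a closed-form bit expression (objective: simpler).

-- ===== PORT A =====
-- bin(m) digits for a natural m > 0, most-significant first (exact for m > 0)
def binCore (m : Nat) : List Char :=
  if h : m = 0 then [] else binCore (m / 2) ++ [if m % 2 = 1 then '1' else '0']
termination_by m
decreasing_by exact Nat.div_lt_self (Nat.pos_of_ne_zero h) (by omega)

-- Python bin(n): '0b…', with a '-' sign for negative n
def pyBin (n : Int) : List Char :=
  if n < 0 then '-' :: '0' :: 'b' :: (if n = 0 then ['0'] else binCore (-n).toNat)
  else '0' :: 'b' :: (if n = 0 then ['0'] else binCore n.toNat)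

-- the inner 'for i in range(len(tmp)-1,-1,-1): if tmp[i]=="0": … break' loop;
-- tmp[0:i] + "10" + tmp[i+2:] is List.take i ++ ['1','0'] ++ List.drop (i+2) (exact for these in-range slices)
def flipAux (tmp : List Char) : Nat → List Char
  | 0 => if tmp.getD 0 ' ' = '0' then ['1', '0'] ++ tmp.drop 2 else tmp
  | i + 1 =>
    if tmp.getD (i + 1) ' ' = '0' then tmp.take (i + 1) ++ ['1', '0'] ++ tmp.drop (i + 3)
    else flipAux tmp i

-- int(tmp, 2): exact for strings made of '0'/'1' digits, the only ones reachable inside Pre_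
def parseBin2 (l : List Char) : Int :=
  l.foldl (fun a c => 2 * a + (if c = '1' then 1 else 0)) 0

-- the else-branch of A's loop body
def twoBitsStep (x : Int) : Int :=
  let tmp := '0' :: (pyBin x).drop 2
  let tmp2 := flipAux tmp (tmp.length - 1)
  parseBin2 tmp2

def solution (numbers : List Int) : List Int :=
  (PySem.List.pyRange 0 (PySem.List.len numbers) 1).foldl
    (fun answer i =>
      if PySem.Int.mod (PySem.List.pyGetD numbers i 0) 4 ≠ 3 then
        answer ++ [PySem.List.pyGetD numbers i 0 + 1]
      else
        answer ++ [twoBitsStep (PySem.List.pyGetD numbers i 0)]) []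

-- ===== PORT B =====
-- Python '(n + 1) & -(n + 1)' is Int.land (two's complement, exact); '// 2' is floor division
def solution_alt (numbers : List Int) : List Int :=
  numbers.map (fun n =>
    if PySem.Int.mod n 4 ≠ 3 then n + 1
    else n + PySem.Int.floordiv (Int.land (n + 1) (-(n + 1))) 2)

-- ===== PRECONDITION & SPEC =====
-- Pre_ excludes lists containing a negative element ≡ 3 (mod 4) — outside the problem's
-- non-negative domain; on those A's string surgery runs on bin()'s sign-stripped digits and
-- returns a value derived from |n|, which B's arithmetic does not reproduce.
def Pre_solution (numbers : List Int) : Prop :=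
  ∀ x ∈ numbers, ¬(x < 0 ∧ x % 4 = 3)
instance (numbers : List Int) : Decidable (Pre_solution numbers) := by
  unfold Pre_solution; infer_instance

def pvWitness_solution : List Int := [0, 3, 7, 11, -2, 6, 2147483647]

def Spec_solution (numbers : List Int) (out : List Int) : Prop := out = solution_alt numbers
instance (numbers : List Int) (out : List Int) : Decidable (Spec_solution numbers out) := by unfold Spec_solution; infer_instance

-- ===== CLAIM (what is proved, stated in full; the proofs are below) =====
def Claim_equal_solution : Prop := ∀ (numbers : List Int), Dom_solution numbers → Pre_solution numbers → Spec_solution numbers (solution numbers)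

-- ===== LEMMAS AND PROOFS =====

-- binary digits of m, least-significant first
def bitsL (m : Nat) : List Char :=
  if h : m = 0 then [] else (if m % 2 = 1 then '1' else '0') :: bitsL (m / 2)
termination_by m
decreasing_by exact Nat.div_lt_self (Nat.pos_of_ne_zero h) (by omega)

-- value of an LSB-first digit list
def val : List Char → Nat
  | [] => 0
  | c :: t => (if c = '1' then 1 else 0) + 2 * val t

-- A's scan, seen on the reversed (LSB-first) list: find the first '0', set it to '1'
-- and the previous position to '0' (inserting when the '0' is at the head)
def flipL : List Char → List Char
  | [] => []
  | [c] => if c = '0' then ['0', '1'] else [c]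
  | c :: d :: t =>
    if c = '0' then '0' :: '1' :: d :: t
    else if d = '0' then '0' :: '1' :: t
    else c :: flipL (d :: t)

-- the amount B adds in the n % 4 == 3 branch, as a recursion on the bits
def amt (m : Nat) : Nat :=
  if h : m % 2 = 0 then 1 else 2 * amt (m / 2)
termination_by m
decreasing_by exact Nat.div_lt_self (by omega) (by omega)

theorem binCore_eq (m : Nat) : binCore m = (bitsL m).reverse := by
  induction m using Nat.strong_induction_on with
  | _ m ih =>
    unfold binCore bitsL
    by_cases h : m = 0
    · simp [h]
    · rw [dif_neg h, dif_neg h, ih (m / 2) (Nat.div_lt_self (Nat.pos_of_ne_zero h) (by omega))]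
      simp

theorem val_bitsL (m : Nat) : val (bitsL m) = m := by
  induction m using Nat.strong_induction_on with
  | _ m ih =>
    unfold bitsL
    by_cases h : m = 0
    · simp [h, val]
    · rw [dif_neg h]
      have := ih (m / 2) (Nat.div_lt_self (Nat.pos_of_ne_zero h) (by omega))
      by_cases hp : m % 2 = 1 <;> simp [hp, val, this] <;> omega

theorem val_append (l : List Char) (c : Char) :
    val (l ++ [c]) = val l + (if c = '1' then 1 else 0) * 2 ^ l.length := by
  induction l with
  | nil => simp [val]
  | cons d t ih =>
    simp only [List.cons_append, val, ih]
    by_cases hc : c = '1' <;> simp [hc, Nat.pow_succ] <;> ring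

theorem val_append_zero (l : List Char) : val (l ++ ['0']) = val l := by
  rw [val_append]; simp

theorem parse_aux (l : List Char) : ∀ a : Int,
    l.foldl (fun a c => 2 * a + (if c = '1' then 1 else 0)) a
      = a * 2 ^ l.length + (val l.reverse : Int) := by
  induction l with
  | nil => simp [val]
  | cons c t ih =>
    intro a
    rw [List.foldl_cons, ih, List.reverse_cons, val_append]
    by_cases hc : c = '1' <;> simp [hc] <;> push_cast <;> ring


theorem parseBin2_eq (l : List Char) : parseBin2 l = (val l.reverse : Int) := by
  unfold parseBin2; rw [parse_aux]; simp

theorem flipL_no_zero : ∀ (l : List Char), (∀ c ∈ l, c ≠ '0') → flipL l = l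
  | [], _ => rfl
  | [c], h => by simp [flipL, h c (by simp)]
  | c :: d :: t, h => by
    simp only [flipL]
    rw [if_neg (h c (by simp)), if_neg (h d (by simp)),
        flipL_no_zero (d :: t) (fun x hx => h x (List.mem_cons_of_mem _ hx))]
termination_by l => l.length
decreasing_by simp

theorem flipL_to_zero : ∀ (v t : List Char), (∀ c ∈ v, c ≠ '0') →
    flipL (v ++ '0' :: t) = v.dropLast ++ '0' :: '1' :: t
  | [], t, _ => by cases t <;> simp [flipL]
  | [a], t, hv => by
    have ha : a ≠ '0' := hv a (by simp)
    simp [flipL, ha]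
  | a :: b :: v'', t, hv => by
    have ha : a ≠ '0' := hv a (by simp)
    have hrest : ∀ c ∈ b :: v'', c ≠ '0' := fun x hx => hv x (List.mem_cons_of_mem _ hx)
    have hb : b ≠ '0' := hrest b (by simp)
    have ih := flipL_to_zero (b :: v'') t hrest
    simp only [List.cons_append] at ih ⊢
    simp only [flipL]
    rw [if_neg ha, if_neg hb, ih]
    simp [List.dropLast_cons_of_ne_nil]
termination_by v _ _ => v.length
decreasing_by simp

theorem rev_dropLast (l : List Char) : l.dropLast.reverse = l.reverse.drop 1 := by
  induction l using List.reverseRecOn with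
  | nil => rfl
  | append_singleton xs x ih => simp

theorem flipAux_bridge (r : List Char) : ∀ v : List Char, r ≠ [] → (∀ c ∈ v, c ≠ '0') →
    flipAux ((v ++ r).reverse) (r.length - 1) = (flipL (v ++ r)).reverse := by
  induction r with
  | nil => intro v h; exact absurd rfl h
  | cons c t ih =>
    intro v _ hv
    cases t with
    | nil =>
      -- r = [c]: index 0
      have hrev : (v ++ [c]).reverse = c :: v.reverse := by simp
      simp only [List.length_cons, List.length_nil, Nat.zero_add, Nat.sub_self, flipAux, hrev,
        List.getD_cons_zero]
      by_cases hc : c = '0'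
      · subst hc
        rw [if_pos rfl]
        rw [flipL_to_zero v [] hv, List.reverse_append, rev_dropLast]
        simp
      · rw [if_neg (by simpa using hc)]
        rw [flipL_no_zero (v ++ [c]) (by
          intro x hx
          rcases List.mem_append.mp hx with h1 | h1
          · exact hv x h1
          · simpa using (List.mem_singleton.mp h1) ▸ hc)]
        simp
    | cons d t' =>
      -- r = c :: d :: t', scan index is t'.length + 1 and looks at c
      have hlen : (c :: d :: t').length - 1 = t'.length + 1 := by simp
      have hrev : (v ++ c :: d :: t').reverse
          = ((t'.reverse ++ [d]) ++ [c]) ++ v.reverse := by simp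
      rw [hlen, hrev]
      have hplen : ((t'.reverse ++ [d]) ++ [c]).length = t'.length + 2 := by simp
      have hget : ((((t'.reverse ++ [d]) ++ [c]) ++ v.reverse).getD (t'.length + 1) ' ') = c := by
        have e : (((t'.reverse ++ [d]) ++ [c]) ++ v.reverse)
            = (t'.reverse ++ [d]) ++ (c :: v.reverse) := by simp
        rw [e]
        simp [List.getD_append_right]
      simp only [flipAux, hget]
      by_cases hc : c = '0'
      · subst hc
        rw [if_pos rfl]
        have htake : ((((t'.reverse ++ [d]) ++ ['0']) ++ v.reverse).take (t'.length + 1))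
            = t'.reverse ++ [d] := by
          rw [List.take_append_of_le_length (by simp)]
          rw [List.take_append_of_le_length (by simp)]
          exact List.take_of_length_le (by simp)
        have hdrop : ((((t'.reverse ++ [d]) ++ ['0']) ++ v.reverse).drop (t'.length + 3))
            = v.reverse.drop 1 := by
          have h2 : t'.length + 3 = ((t'.reverse ++ [d]) ++ ['0']).length + 1 := by simp
          rw [h2, ← List.drop_drop, List.drop_left]
        rw [htake, hdrop, flipL_to_zero v (d :: t') hv, List.reverse_append, rev_dropLast]
        simp
      · rw [if_neg (by simpa using hc)]
        have hassoc : ((t'.reverse ++ [d]) ++ [c]) ++ v.reverse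
            = ((v ++ [c]) ++ d :: t').reverse := by simp
        have hlen2 : t'.length = (d :: t').length - 1 := by simp
        rw [hassoc, hlen2,
            ih (v ++ [c]) (by simp) (by
              intro x hx
              rcases List.mem_append.mp hx with h1 | h1
              · exact hv x h1
              · simpa using (List.mem_singleton.mp h1) ▸ hc)]
        have : (v ++ [c]) ++ d :: t' = v ++ c :: d :: t' := by simp
        rw [this]

theorem val_one_cons (t : List Char) : val ('1' :: t) = 1 + 2 * val t := by
  simp [val]

theorem val_zero_cons (t : List Char) : val ('0' :: t) = 2 * val t := by
  simp [val]

theorem main_val (m : Nat) (hm : m % 2 = 1) :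
    val (flipL (bitsL m ++ ['0'])) = m + amt m / 2 := by
  induction m using Nat.strong_induction_on with
  | _ m ih =>
    have hm0 : m ≠ 0 := by omega
    have hb : bitsL m = '1' :: bitsL (m / 2) := by
      rw [bitsL]; rw [dif_neg hm0, if_pos hm]
    have hamt : amt m = 2 * amt (m / 2) := by
      rw [amt]; rw [dif_neg (by omega)]
    by_cases h0 : m / 2 = 0
    · -- m = 1
      have hm1 : m = 1 := by omega
      subst hm1
      have h00 : bitsL 0 = [] := by rw [bitsL]; simp
      have ha0 : amt 0 = 1 := by rw [amt]; simp
      rw [hb, h0, h00]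
      have hfl : flipL (('1' :: []) ++ ['0']) = ['0', '1'] := by decide
      rw [hfl, hamt, h0, ha0]
      decide
    · by_cases hp : m / 2 % 2 = 1
      · -- m % 4 = 3 : two leading ones
        have hbh : bitsL (m / 2) = '1' :: bitsL (m / 2 / 2) := by
          rw [bitsL]; rw [dif_neg h0, if_pos hp]
        have hih := ih (m / 2) (by omega) hp
        have hah : amt (m / 2) = 2 * amt (m / 2 / 2) := by
          rw [amt]; rw [dif_neg (by omega)]
        rw [hb, hbh]
        simp only [List.cons_append, flipL]
        split_ifs with h1
        · exact absurd h1 (by decide)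
        · rw [← List.cons_append, ← hbh, val_one_cons, hih, hamt, hah]
          omega
      · -- m % 4 = 1 : '1' then '0'
        have hbh : bitsL (m / 2) = '0' :: bitsL (m / 2 / 2) := by
          rw [bitsL]; rw [dif_neg h0, if_neg hp]
        have hah : amt (m / 2) = 1 := by
          rw [amt]; rw [dif_pos (by omega)]
        have hv2 : val (bitsL (m / 2 / 2) ++ ['0']) = m / 2 / 2 := by
          rw [val_append_zero, val_bitsL]
        rw [hb, hbh]
        simp only [List.cons_append, flipL]
        split_ifs with h1
        · exact absurd h1 (by decide)
        · rw [val_zero_cons, val_one_cons, hv2, hamt, hah]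
          omega

theorem ldiff_self (n : Nat) : n.ldiff n = 0 := by
  apply Nat.eq_of_testBit_eq; intro i; simp [Nat.testBit_ldiff]

theorem ldiff_amt (m : Nat) : (m + 1).ldiff m = amt m := by
  induction m using Nat.strong_induction_on with
  | _ m ih =>
    by_cases he : m % 2 = 0
    · obtain ⟨k, rfl⟩ : ∃ k, m = 2 * k := ⟨m / 2, by omega⟩
      have ha : amt (2 * k) = 1 := by rw [amt]; rw [dif_pos (by omega)]
      rw [ha, show 2 * k + 1 = Nat.bit true k from by simp [Nat.bit],
          show 2 * k = Nat.bit false k from by simp [Nat.bit]]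
      simp only [Nat.ldiff]
      rw [Nat.bitwise_bit]
      have h3 : Nat.bitwise (fun a b => a && !b) k k = 0 := by
        have := ldiff_self k; simpa [Nat.ldiff] using this
      rw [h3]
      simp [Nat.bit]
    · obtain ⟨k, rfl⟩ : ∃ k, m = 2 * k + 1 := ⟨m / 2, by omega⟩
      have hih := ih k (by omega)
      have hk2 : (2 * k + 1) / 2 = k := by omega
      have ha : amt (2 * k + 1) = 2 * amt k := by
        rw [amt]; rw [dif_neg (by omega), hk2]
      rw [ha, show 2 * k + 1 + 1 = Nat.bit false (k + 1) from by simp [Nat.bit]; omega,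
          show 2 * k + 1 = Nat.bit true k from by simp [Nat.bit]]
      simp only [Nat.ldiff]
      rw [Nat.bitwise_bit]
      have h3 : Nat.bitwise (fun a b => a && !b) (k + 1) k = amt k := by
        simpa [Nat.ldiff] using hih
      rw [h3]
      simp [Nat.bit]

theorem elem_eq (x : Int) (hx : ¬(x < 0 ∧ x % 4 = 3)) :
    (if PySem.Int.mod x 4 ≠ 3 then x + 1 else twoBitsStep x)
      = (if PySem.Int.mod x 4 ≠ 3 then x + 1
         else x + PySem.Int.floordiv (Int.land (x + 1) (-(x + 1))) 2) := by
  by_cases hne : PySem.Int.mod x 4 ≠ 3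
  · rw [if_pos hne, if_pos hne]
  · have hmod : PySem.Int.mod x 4 = 3 := not_not.mp hne
    have h4 : x % 4 = 3 := by
      rw [← PySem.Int.mod_eq_emod_of_pos (by norm_num : (0 : Int) < 4)]; exact hmod
    have hx0 : 0 ≤ x := by
      by_contra hneg
      exact hx ⟨by omega, h4⟩
    obtain ⟨m, rfl⟩ : ∃ m : Nat, x = (m : Int) := ⟨x.toNat, (Int.toNat_of_nonneg hx0).symm⟩
    have hm4 : m % 4 = 3 := by omega
    have hm2 : m % 2 = 1 := by omega
    have hm0 : m ≠ 0 := by omega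
    rw [if_neg hne, if_neg hne]
    -- right-hand side: the bit expression is ldiff (m+1) m = amt m
    have h1 : ((m : Int) + 1) = Int.ofNat (m + 1) := by
      rw [Int.ofNat_eq_natCast, Nat.cast_add, Nat.cast_one]
    have h2 : -(Int.ofNat (m + 1)) = Int.negSucc m := rfl
    have hland : Int.land ((m : Int) + 1) (-((m : Int) + 1)) = ((((m + 1).ldiff m) : Nat) : Int) := by
      rw [h1, h2]; rfl
    have hfd : PySem.Int.floordiv ((((m + 1).ldiff m) : Nat) : Int) 2 = (((m + 1).ldiff m / 2 : Nat) : Int) := by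
      exact_mod_cast PySem.Int.floordiv_natCast ((m + 1).ldiff m) 2
    rw [hland, hfd, ldiff_amt]
    -- left-hand side: unfold A's string machinery
    unfold twoBitsStep pyBin
    rw [if_neg (not_lt.mpr (Int.natCast_nonneg m)),
        if_neg (show ¬((m : Int) = 0) by exact_mod_cast hm0)]
    simp only [List.drop_succ_cons, List.drop_zero, Int.toNat_natCast, binCore_eq]
    have htmp : ('0' :: (bitsL m).reverse) = (bitsL m ++ ['0']).reverse := by simp
    rw [htmp]
    have hbr : flipAux ((bitsL m ++ ['0']).reverse) ((bitsL m ++ ['0']).length - 1)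
        = (flipL (bitsL m ++ ['0'])).reverse := by
      have := flipAux_bridge (bitsL m ++ ['0']) [] (by simp) (by simp)
      simpa using this
    rw [List.length_reverse, hbr, parseBin2_eq, List.reverse_reverse, main_val m hm2]
    push_cast
    ring

theorem fold_map_bridge (xs : List Int) (g : Int → Int) :
    (PySem.List.pyRange 0 (PySem.List.len xs) 1).foldl
      (fun acc i => acc ++ [g (PySem.List.pyGetD xs i 0)]) [] = xs.map g := by
  have h := PySem.List.foldl_pyRange_pyGetD xs 0
      (fun (acc : List Int) (x : Int) => acc ++ [g x]) ([] : List Int) (le_refl 0)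
  simp only [Int.toNat_zero, List.drop_zero] at h
  rw [h, PySem.List.foldl_append_singleton_eq_map, List.nil_append]

-- ===== VERDICT (by name: the statement is the Claim_ definition above) =====
theorem solution_spec : Claim_equal_solution := by
  intro numbers _hdom hpre
  unfold Spec_solution solution solution_alt
  rw [show (fun (answer : List Int) (i : Int) =>
        if PySem.Int.mod (PySem.List.pyGetD numbers i 0) 4 ≠ 3 then
          answer ++ [PySem.List.pyGetD numbers i 0 + 1]
        else answer ++ [twoBitsStep (PySem.List.pyGetD numbers i 0)])
      = (fun (answer : List Int) (i : Int) =>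
          answer ++ [if PySem.Int.mod (PySem.List.pyGetD numbers i 0) 4 ≠ 3 then
            PySem.List.pyGetD numbers i 0 + 1 else twoBitsStep (PySem.List.pyGetD numbers i 0)]) from by
        funext a i; split <;> rfl]
  rw [fold_map_bridge numbers
       (fun x => if PySem.Int.mod x 4 ≠ 3 then x + 1 else twoBitsStep x)]
  exact List.map_congr_left (fun x hx => elem_eq x (hpre x hx))
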